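-- pv_equiv track=rewrite | github.com/ajamaloodin/myTrainingPath | Certified Python Course/ejercicios/prueba.py | decrement_items
-- ===== SOURCE A (Python) =====
-- def create_inventory(items):
--     invent = {}
--     long = len(items)
--     procesada = []
--     for index, item in enumerate(items):
--         if item not in procesada:
--             count = 1
--             index2 = index + 1
--             while index2 < long and item not in procesada:
--                 if item in items[index2::]:
--                     count += 1
--                 index2 += 1
--             invent[item] = count
--             procesada.append(item)
--     return invent
--
-- def decrement_items(inventory, items):
--
--     items.sort()
--     nuevos = create_inventory(items)
--
--     for key, value in nuevos.items():
--         if inventory.get(key, 'nei') != 'nei':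
--             new_value = inventory[key] - value
--             if new_value < 0:
--                 new_value = 0
--             inventory[key] = new_value
--
--     return inventory
-- ===== SOURCE B (Python) =====
-- def decrement_items(inventory, items):
--     # single pass over the (in-place) sorted items, decrementing one at a time,
--     # clamped at zero; no intermediate count dict
--     items.sort()
--     for item in items:
--         if item in inventory:
--             inventory[item] = max(inventory[item] - 1, 0)
--     return inventory
-- ===== Notes on version B (the rewrite author's own statement) =====
-- stated objective: simpler
-- what changed: Drops the create_inventory occurrence-counting helper (a quadratic nested scan with per-index slice membership tests building a count dict) in favour of a single pass over the sorted items that decrements each present key by one, clamped at zero.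
import Mathlib
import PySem

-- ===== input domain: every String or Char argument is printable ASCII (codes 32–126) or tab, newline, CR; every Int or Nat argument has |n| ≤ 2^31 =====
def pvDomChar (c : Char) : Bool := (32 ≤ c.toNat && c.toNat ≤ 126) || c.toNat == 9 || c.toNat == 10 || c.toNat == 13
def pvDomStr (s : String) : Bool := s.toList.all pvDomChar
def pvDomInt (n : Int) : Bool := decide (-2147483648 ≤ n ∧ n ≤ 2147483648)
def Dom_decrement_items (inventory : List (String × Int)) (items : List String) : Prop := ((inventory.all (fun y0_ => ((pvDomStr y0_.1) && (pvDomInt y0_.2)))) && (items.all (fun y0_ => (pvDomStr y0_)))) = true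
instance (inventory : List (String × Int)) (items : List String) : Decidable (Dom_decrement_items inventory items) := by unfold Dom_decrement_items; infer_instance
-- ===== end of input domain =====

-- B replaces A's quadratic count-dict helper by a single decrement-and-clamp pass over the
-- sorted items (simpler); both versions sort `items` in place and mutate/return `inventory`
-- (equivalence proved about the returned value).

-- ===== PORT A =====
-- inner while loop of create_inventory: `while index2 < long and item not in procesada: ...`
def ciInner (items procesada : List String) (item : String) (long index2 count : Int) : Int :=
  if h : index2 < long ∧ item ∉ procesada then
    ciInner items procesada item long (index2 + 1)
      (if item ∈ PySem.List.slice items (some index2) none then count + 1 else count)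
  else count
termination_by (long - index2).toNat
decreasing_by omega

-- body of create_inventory's outer `for index, item in enumerate(items)` loop
def ciStep (items : List String) (long : Int)
    (st : PySem.Dict String Int × List String) (p : Int × String) : PySem.Dict String Int × List String :=
  if p.2 ∉ st.2 then
    (st.1.insert p.2 (ciInner items st.2 p.2 long (p.1 + 1) 1), st.2 ++ [p.2])
  else st

def create_inventory (items : List String) : PySem.Dict String Int :=
  let long : Int := items.length
  ((PySem.List.enumerate items 0).foldl (ciStep items long) (PySem.Dict.empty, [])).1

-- `if inventory.get(key,'nei') != 'nei':` — the values are ints, never equal to 'nei',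
-- so the guard holds exactly when the key is present (get? is some)
def updA (inv : PySem.Dict String Int) (kv : String × Int) : PySem.Dict String Int :=
  match inv.get? kv.1 with
  | none => inv
  | some cur =>
      let nv := cur - kv.2
      inv.insert kv.1 (if nv < 0 then 0 else nv)

def decrement_items (inventory : List (String × Int)) (items : List String) : List (String × Int) :=
  let items' := PySem.List.sorted items (fun x => x) false   -- items.sort()
  let nuevos := create_inventory items'
  ((nuevos.items).foldl updA (PySem.Dict.mk inventory)).items

-- ===== PORT B =====
-- `if item in inventory: inventory[item] = max(inventory[item] - 1, 0)`
def updB (inv : PySem.Dict String Int) (item : String) : PySem.Dict String Int :=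
  if inv.contains item then inv.insert item (max (inv.getD item 0 - 1) 0) else inv

def decrement_items_alt (inventory : List (String × Int)) (items : List String) : List (String × Int) :=
  ((PySem.List.sorted items (fun x => x) false).foldl updB (PySem.Dict.mk inventory)).items

-- ===== PRECONDITION & SPEC =====
def Spec_decrement_items (inventory : List (String × Int)) (items : List String) (out : List (String × Int)) : Prop := out = decrement_items_alt inventory items
instance (inventory : List (String × Int)) (items : List String) (out : List (String × Int)) : Decidable (Spec_decrement_items inventory items out) := by unfold Spec_decrement_items; infer_instance

-- ===== CLAIM (what is proved, stated in full; the proofs are below) =====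
def Claim_equal_decrement_items : Prop := ∀ (inventory : List (String × Int)) (items : List String), Dom_decrement_items inventory items → Spec_decrement_items inventory items (decrement_items inventory items)

-- ===== LEMMAS AND PROOFS =====

-- a pairwise-≤ list groups equal elements: the head's occurrences form a prefix
theorem pv_pw_decomp (t : List String) (a : String) (h : List.Pairwise (· ≤ ·) (a :: t)) :
    ∃ (m : Nat) (rest : List String), t = List.replicate m a ++ rest ∧ a ∉ rest := by
  induction t generalizing a with
  | nil => exact ⟨0, [], rfl, by simp⟩
  | cons b t' ih =>
    rw [List.pairwise_cons] at h
    obtain ⟨hab, hbt⟩ := h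
    by_cases hba : b = a
    · subst hba
      obtain ⟨m, rest, ht', har⟩ := ih b hbt
      exact ⟨m + 1, rest, by simp [List.replicate_succ, ht'], har⟩
    · refine ⟨0, b :: t', rfl, ?_⟩
      intro hmem
      rcases List.mem_cons.1 hmem with hq | hq
      · exact hba hq.symm
      · rw [List.pairwise_cons] at hbt
        exact hba (le_antisymm (hbt.1 a hq) (hab b (List.mem_cons_self)))

theorem pv_mem_drop_group (a : String) (rest : List String) (hr : a ∉ rest) :
    ∀ (i m : Nat), (a ∈ (List.replicate (m + 1) a ++ rest).drop i ↔ i ≤ m) := by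
  intro i
  induction i with
  | zero => intro m; simp [List.mem_replicate]
  | succ i ih =>
    intro m
    cases m with
    | zero =>
      simp only [List.replicate_succ, List.replicate_zero, List.nil_append, List.cons_append,
        List.drop_succ_cons, List.nil_append]
      constructor
      · intro hmem; exact absurd (List.mem_of_mem_drop hmem) hr
      · omega
    | succ m' =>
      rw [List.replicate_succ, List.cons_append, List.drop_succ_cons, ih m']
      omega

-- closed form of the inner while loop, at a group `replicate (m+1) a` starting at index |pre|
theorem pv_ciL (pre rest p : List String) (a : String) (m : Nat)
    (hp : a ∉ p) (hr : a ∉ rest) (index2 count : Int)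
    (h1 : (pre.length : Int) + 1 ≤ index2)
    (h2 : index2 ≤ ((pre ++ (List.replicate (m + 1) a ++ rest)).length : Int)) :
    ciInner (pre ++ (List.replicate (m + 1) a ++ rest)) p a
        ((pre ++ (List.replicate (m + 1) a ++ rest)).length : Int) index2 count
      = count + max ((pre.length : Int) + m + 1 - index2) 0 := by
  have hlen : ((pre ++ (List.replicate (m + 1) a ++ rest)).length : Int)
      = (pre.length : Int) + (m + 1) + rest.length := by
    simp [List.length_append, List.length_replicate]; ring
  rw [ciInner]
  by_cases hlt : index2 < ((pre ++ (List.replicate (m + 1) a ++ rest)).length : Int)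
  · rw [dif_pos ⟨hlt, hp⟩]
    have h0 : (0 : Int) ≤ index2 := by omega
    have hdrop : index2.toNat = pre.length + (index2.toNat - pre.length) := by omega
    have hmem : (a ∈ PySem.List.slice (pre ++ (List.replicate (m + 1) a ++ rest)) (some index2))
        ↔ index2 ≤ (pre.length : Int) + m := by
      rw [PySem.List.slice_from _ h0, hdrop, List.drop_append]
      have hsz : pre.length + (index2.toNat - pre.length) - pre.length = index2.toNat - pre.length := by omega
      rw [hsz]
      have hde : List.drop (pre.length + (index2.toNat - pre.length)) pre = [] := by
        apply List.drop_eq_nil_of_le; omega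
      rw [hde, List.nil_append, pv_mem_drop_group a rest hr]
      omega
    have hrec := pv_ciL pre rest p a m hp hr (index2 + 1)
      (if a ∈ PySem.List.slice (pre ++ (List.replicate (m + 1) a ++ rest)) (some index2) then count + 1 else count)
      (by omega) (by omega)
    rw [hrec]
    by_cases hle : index2 ≤ (pre.length : Int) + m
    · rw [if_pos (hmem.2 hle)]; omega
    · rw [if_neg (fun hc => hle (hmem.1 hc))]; omega
  · rw [dif_neg (fun hc => hlt hc.1)]
    omega
termination_by (((pre ++ (List.replicate (m + 1) a ++ rest)).length : Int) - index2).toNat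
decreasing_by omega

-- duplicate items already in `procesada` are skipped by the outer loop
theorem pv_skip_replicate (items : List String) (long : Int) (a : String) (m : Nat) :
    ∀ (j : Int) (st : PySem.Dict String Int × List String), a ∈ st.2 →
      (PySem.List.enumerate (List.replicate m a) j).foldl (ciStep items long) st = st := by
  induction m with
  | zero => intro j st _; simp
  | succ m ih =>
    intro j st hmem
    rw [List.replicate_succ, PySem.List.enumerate_cons, List.foldl_cons]
    have : ciStep items long st (j, a) = st := by
      unfold ciStep; rw [if_neg]; simp [hmem]
    rw [this]; exact ih (j + 1) st hmem

-- the count list A's helper produces on a grouped list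
def gcounts : List String → List (String × Int)
  | [] => []
  | a :: t =>
      (a, ((t.takeWhile (fun b => b == a)).length : Int) + 1) :: gcounts (t.dropWhile (fun b => b == a))
termination_by s => s.length
decreasing_by
  simp only [List.length_cons]
  exact Nat.lt_succ_of_le (List.length_dropWhile_le _ _)

theorem pv_takeWhile_group (a : String) (m : Nat) (rest : List String) (hr : a ∉ rest) :
    (List.replicate m a ++ rest).takeWhile (fun b => b == a) = List.replicate m a ∧
    (List.replicate m a ++ rest).dropWhile (fun b => b == a) = rest := by
  induction m with
  | zero =>
    cases rest with
    | nil => simp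
    | cons c cs =>
      have hca : (c == a) = false := by
        simp only [beq_eq_false_iff_ne]; intro hc; exact hr (hc ▸ List.mem_cons_self)
      simp [hca]
  | succ m ih =>
    simp only [List.replicate_succ, List.cons_append, List.takeWhile_cons, List.dropWhile_cons,
      beq_self_eq_true, if_pos]
    exact ⟨by rw [ih.1], by rw [ih.2]⟩

theorem pv_gcounts_group (a : String) (m : Nat) (rest : List String) (hr : a ∉ rest) :
    gcounts (a :: (List.replicate m a ++ rest)) = (a, (m : Int) + 1) :: gcounts rest := by
  rw [gcounts]
  rw [(pv_takeWhile_group a m rest hr).1, (pv_takeWhile_group a m rest hr).2]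
  simp

-- Stage 1: on a pairwise-≤ suffix s (full list = pre ++ s, fresh keys), the outer loop
-- appends exactly (item, group size) pairs, i.e. gcounts s
theorem pv_outer (s : List String) (pre : List String) (d : PySem.Dict String Int) (p : List String)
    (full : List String) (hfull : full = pre ++ s)
    (hpair : List.Pairwise (· ≤ ·) s)
    (hp : ∀ x ∈ s, x ∉ p)
    (hd : ∀ x ∈ s, d.contains x = false) :
    ((PySem.List.enumerate s (pre.length : Int)).foldl (ciStep full (full.length : Int)) (d, p)).1.items
      = d.items ++ gcounts s := by
  cases hs : s with
  | nil => simp [gcounts]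
  | cons a t =>
    rw [hs] at hfull hpair hp hd
    obtain ⟨m, rest, ht, har⟩ := pv_pw_decomp t a hpair
    have hfull2 : full = pre ++ (List.replicate (m + 1) a ++ rest) := by
      rw [hfull, ht]; simp [List.replicate_succ]
    rw [PySem.List.enumerate_cons, List.foldl_cons]
    have hap : a ∉ p := hp a List.mem_cons_self
    have hstep : ciStep full (full.length : Int) (d, p) ((pre.length : Int), a)
        = (d.insert a ((m : Int) + 1), p ++ [a]) := by
      unfold ciStep
      rw [if_pos hap]
      have hL : ((pre ++ (List.replicate (m + 1) a ++ rest)).length : Int)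
          = (pre.length : Int) + ((m : Int) + 1) + rest.length := by
        simp [List.length_append, List.length_replicate]; ring
      have hci := pv_ciL pre rest p a m hap har ((pre.length : Int) + 1) 1 (by omega)
        (by rw [hL]; omega)
      rw [hfull2]
      simp only [hci]
      have : max ((pre.length : Int) + m + 1 - ((pre.length : Int) + 1)) 0 = m := by omega
      rw [this]
      have : (1 : Int) + m = (m : Int) + 1 := by ring
      rw [this]
    rw [hstep, ht, PySem.List.enumerate_append]
    rw [List.foldl_append]
    rw [pv_skip_replicate full (full.length : Int) a m _ _ (by simp)]
    have hcast : (pre.length : Int) + 1 + ((List.replicate m a).length : Int)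
        = (((pre ++ List.replicate (m + 1) a).length : Nat) : Int) := by
      simp [List.length_append, List.length_replicate]; ring
    rw [hcast]
    have hpairrest : List.Pairwise (· ≤ ·) rest := by
      have : rest.Sublist t := ht ▸ List.sublist_append_right _ _
      exact List.Pairwise.sublist this ((List.pairwise_cons.1 hpair).2)
    have hrec := pv_outer rest (pre ++ List.replicate (m + 1) a) (d.insert a ((m : Int) + 1)) (p ++ [a])
      full (by rw [hfull2, List.append_assoc])
      hpairrest
      (by
        intro x hx
        have hxt : x ∈ t := by rw [ht]; exact List.mem_append_right _ hx
        simp only [List.mem_append, List.mem_singleton]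
        rintro (hxp | hxa)
        · exact hp x (List.mem_cons_of_mem a hxt) hxp
        · exact har (hxa ▸ hx))
      (by
        intro x hx
        rw [PySem.Dict.contains_insert]
        have hxa : (x == a) = false := by
          simp only [beq_eq_false_iff_ne]; intro hc; exact har (hc ▸ hx)
        rw [hxa]
        have hxt : x ∈ t := by rw [ht]; exact List.mem_append_right _ hx
        simp [hd x (List.mem_cons_of_mem a hxt)])
    rw [hrec]
    have hfreshA : d.contains a = false := hd a List.mem_cons_self
    rw [PySem.Dict.items_insert_of_not_contains d _ hfreshA]
    rw [pv_gcounts_group a m rest har]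
    rw [List.append_assoc, List.singleton_append]
termination_by s.length
decreasing_by
  have hle : rest.length ≤ t.length := by
    rw [ht]; simp only [List.length_append]; omega
  rw [hs]
  simp only [List.length_cons]
  omega

-- (d.insert k x).insert k y = d.insert k y
theorem pv_insert_insert {κ ν : Type} [BEq κ] [LawfulBEq κ]
    (d : PySem.Dict κ ν) (k : κ) (x y : ν) : (d.insert k x).insert k y = d.insert k y := by
  apply PySem.Dict.ext
  by_cases hc : d.contains k
  · rw [PySem.Dict.items_insert_of_contains _ _ (PySem.Dict.contains_insert_self d k x),
      PySem.Dict.items_insert_of_contains _ _ hc, PySem.Dict.items_insert_of_contains _ _ hc,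
      List.map_map]
    apply List.map_congr_left
    intro p _
    by_cases hpk : (p.1 == k) = true <;> simp [hpk]
  · have hc' : d.contains k = false := by simpa using hc
    rw [PySem.Dict.items_insert_of_not_contains _ _ hc']
    rw [PySem.Dict.items_insert_of_contains _ _ (PySem.Dict.contains_insert_self d k x)]
    rw [PySem.Dict.items_insert_of_not_contains _ _ hc']
    rw [List.map_append]
    congr 1
    · conv_rhs => rw [← List.map_id d.items]
      apply List.map_congr_left
      intro p hp
      have : (p.1 == k) = false := by
        simp only [beq_eq_false_iff_ne]
        intro hpk
        have hk : k ∈ d.keys := hpk ▸ PySem.Dict.mem_keys_of_mem_items d hp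
        have := (PySem.Dict.contains_iff_mem_keys d k).2 hk
        rw [hc'] at this
        exact Bool.noConfusion this
      simp [this]
    · simp

-- reductions of the two update bodies by presence of the key
theorem pv_updA_none (inv : PySem.Dict String Int) (kv : String × Int)
    (h : inv.get? kv.1 = none) : updA inv kv = inv := by
  unfold updA; rw [h]

theorem pv_updA_some (inv : PySem.Dict String Int) (kv : String × Int) (v : Int)
    (h : inv.get? kv.1 = some v) :
    updA inv kv = inv.insert kv.1 (if v - kv.2 < 0 then 0 else v - kv.2) := by
  unfold updA; rw [h]

theorem pv_updB_none (inv : PySem.Dict String Int) (a : String)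
    (h : inv.get? a = none) : updB inv a = inv := by
  unfold updB; rw [PySem.Dict.contains_eq_isSome_get?, h]; simp

theorem pv_updB_some (inv : PySem.Dict String Int) (a : String) (v : Int)
    (h : inv.get? a = some v) : updB inv a = inv.insert a (max (v - 1) 0) := by
  unfold updB
  rw [PySem.Dict.contains_eq_isSome_get?, h, PySem.Dict.getD_of_get?_eq_some inv 0 h]
  simp

-- one whole-group A-update equals group-size many B-updates
theorem pv_updAB (a : String) (m : Nat) :
    ∀ (inv : PySem.Dict String Int),
      (List.replicate (m + 1) a).foldl updB inv = updA inv (a, (m : Int) + 1) := by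
  induction m with
  | zero =>
    intro inv
    simp only [List.replicate_succ, List.replicate_zero, List.foldl_cons, List.foldl_nil]
    cases hg : inv.get? a with
    | none => rw [pv_updB_none inv a hg, pv_updA_none inv _ hg]
    | some v =>
      rw [pv_updB_some inv a v hg, pv_updA_some inv _ v hg]
      congr 1
      split_ifs <;> omega
  | succ m ih =>
    intro inv
    rw [List.replicate_succ, List.foldl_cons, ih (updB inv a)]
    cases hg : inv.get? a with
    | none =>
      rw [pv_updB_none inv a hg, pv_updA_none inv _ hg, pv_updA_none inv _ hg]
    | some v =>
      rw [pv_updB_some inv a v hg,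
        pv_updA_some _ _ _ (PySem.Dict.get?_insert_self inv a (max (v - 1) 0)),
        pv_insert_insert, pv_updA_some inv _ v hg]
      congr 1
      split_ifs <;> omega

-- Stage 2: folding A's count pairs equals folding B's per-item decrements
theorem pv_foldAB (s : List String) (hpair : List.Pairwise (· ≤ ·) s) :
    ∀ (inv : PySem.Dict String Int), (gcounts s).foldl updA inv = s.foldl updB inv := by
  cases hs : s with
  | nil => intro inv; simp [gcounts]
  | cons a t =>
    rw [hs] at hpair
    intro inv
    obtain ⟨m, rest, ht, har⟩ := pv_pw_decomp t a hpair
    rw [ht, pv_gcounts_group a m rest har, List.foldl_cons]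
    have hgrp : a :: (List.replicate m a ++ rest) = List.replicate (m + 1) a ++ rest := by
      simp [List.replicate_succ]
    rw [hgrp, List.foldl_append, pv_updAB a m inv]
    have hpairrest : List.Pairwise (· ≤ ·) rest := by
      have : rest.Sublist t := ht ▸ List.sublist_append_right _ _
      exact List.Pairwise.sublist this ((List.pairwise_cons.1 hpair).2)
    exact pv_foldAB rest hpairrest (updA inv (a, (m : Int) + 1))
termination_by s.length
decreasing_by
  have hle : rest.length ≤ t.length := by
    rw [ht]; simp only [List.length_append]; omega
  rw [hs]
  simp only [List.length_cons]
  omega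

-- ===== VERDICT (by name: the statement is the Claim_ definition above) =====
theorem decrement_items_spec : Claim_equal_decrement_items := by
  intro inventory items _
  unfold Spec_decrement_items
  simp only [decrement_items, decrement_items_alt, create_inventory]
  have hpair : List.Pairwise (· ≤ ·) (PySem.List.sorted items (fun x => x) false) :=
    PySem.List.sorted_pairwise items (fun x => x)
  have houter := pv_outer (PySem.List.sorted items (fun x => x) false) [] PySem.Dict.empty []
    (PySem.List.sorted items (fun x => x) false) (by simp) hpair (by simp) (by simp)
  simp only [List.length_nil, Nat.cast_zero] at houter
  rw [houter]
  have hemp : (PySem.Dict.empty : PySem.Dict String Int).items = [] := rfl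
  rw [hemp, List.nil_append]
  exact congrArg PySem.Dict.items
    (pv_foldAB (PySem.List.sorted items (fun x => x) false) hpair (PySem.Dict.mk inventory))
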